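-- pv_equiv track=rewrite | github.com/mmccthomas/Pythonista_games | Card_Games/freecell/Functions.py | longest_movable_sequence
-- ===== SOURCE A (Python) =====
-- def goes_below(cardA, cardB):
--     '''
--     Return True if cardA can go below cardB (in a cascade).
--
--     Arguments:
--       cardA -- a card Tuple
--       cardB -- a card Tuple in a cascade
--
--     Return value:
--       True if cardA can go below cardB, otherwise False
--     '''
--     valA, sValA = cardA
--     valB, sValB = cardB
--     if (sValA + sValB) % 2 == 0:
--         return False
--     if valA is not valB - 1:
--         return False
--     return True
--
-- def longest_movable_sequence(cards):
--     '''
--     Compute the length of the longest sequence of cards at the end of a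
--     tuple of cards that can be moved in a single move.  Cards in the sequence
--     must be in strict descending order and alternate colors.
--
--     Arguments:
--       cards -- a tuple of cards (a cascade in its usual state)
--
--     Return value:
--       the number of cards at the end of the tuple forming the longest
--       sequence
--     '''
--
--     sizeOfSeq = 0
--     if cards:
--         sizeOfSeq = 1
--     for i in range(-1, -len(cards), -1):
--         topCard = cards[i-1]
--         bottomCard = cards[i]
--         if not goes_below(bottomCard, topCard):
--             break
--         sizeOfSeq += 1
--     return sizeOfSeq
-- ===== SOURCE B (Python) =====
-- def goes_below(cardA, cardB):
--     # reused verbatim from A (including the CPython small-int `is` comparison)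
--     valA, sValA = cardA
--     valB, sValB = cardB
--     if (sValA + sValB) % 2 == 0:
--         return False
--     if valA is not valB - 1:
--         return False
--     return True
--
--
-- def longest_movable_sequence(cards):
--     # single forward pass: `run` is the length of the valid sequence ending at
--     # the current card; it resets to 1 whenever the adjacency test fails.
--     run = 0
--     prev = None
--     for card in cards:
--         if prev is None or not goes_below(card, prev):
--             run = 1
--         else:
--             run += 1
--         prev = card
--     return run
-- ===== Notes on version B (the rewrite author's own statement) =====
-- stated objective: alternative
-- what changed: B replaces A's backward negative-index countdown with early break by a single forward pass that maintains a DP-style run counter (length of the valid sequence ending at the current card, reset to 1 on a failed adjacency test) and returns the run at the end; goes_below is reused verbatim so its small-int `is` quirk is preserved exactly.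
import Mathlib
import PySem

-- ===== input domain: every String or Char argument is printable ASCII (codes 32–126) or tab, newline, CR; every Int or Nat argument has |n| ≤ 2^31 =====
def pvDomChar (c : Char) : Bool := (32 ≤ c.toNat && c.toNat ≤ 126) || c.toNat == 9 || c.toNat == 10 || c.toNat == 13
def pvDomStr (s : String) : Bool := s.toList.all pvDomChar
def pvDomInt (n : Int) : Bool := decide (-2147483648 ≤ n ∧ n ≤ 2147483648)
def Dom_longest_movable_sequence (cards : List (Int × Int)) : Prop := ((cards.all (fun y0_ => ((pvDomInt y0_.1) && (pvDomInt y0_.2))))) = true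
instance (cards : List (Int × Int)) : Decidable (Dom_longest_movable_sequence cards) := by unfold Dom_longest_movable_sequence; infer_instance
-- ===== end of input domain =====

-- B replaces A's backward countdown-with-break by a single forward pass maintaining a
-- reset-on-failure run counter (alternative decomposition, same cost).


-- ===== PORT A =====
-- CPython `a is b` where b is the freshly computed int `valB - 1`: identity holds exactly
-- when the values are equal and the value lies in the small-int cache [-5, 256].
def pyIntIs (a b : Int) : Bool := a == b && decide (-5 ≤ b) && decide (b ≤ 256)

-- shared helper: Source B reuses A's goes_below verbatim, so both ports cite this one definition
def goes_below (cardA cardB : Int × Int) : Bool :=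
  let valA := cardA.1
  let sValA := cardA.2
  let valB := cardB.1
  let sValB := cardB.2
  if PySem.Int.mod (sValA + sValB) 2 == 0 then false
  else if !(pyIntIs valA (valB - 1)) then false
  else true

-- A's for-loop over range(-1, -len(cards), -1) with break; indices are always in range,
-- so the `.getD (0,0)` default after pyGet? is never used
def lms_loop (cards : List (Int × Int)) : List Int → Int → Int
  | [], sizeOfSeq => sizeOfSeq
  | i :: rest, sizeOfSeq =>
    let topCard := (PySem.List.pyGet? cards (i - 1)).getD (0, 0)
    let bottomCard := (PySem.List.pyGet? cards i).getD (0, 0)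
    if !(goes_below bottomCard topCard) then sizeOfSeq
    else lms_loop cards rest (sizeOfSeq + 1)

def longest_movable_sequence (cards : List (Int × Int)) : Int :=
  let sizeOfSeq : Int := if !cards.isEmpty then 1 else 0
  lms_loop cards (PySem.List.pyRange (-1) (-(cards.length : Int)) (-1)) sizeOfSeq

-- ===== PORT B =====
-- Source B's forward loop: state = (run, prev); run resets to 1 when prev is None or the
-- adjacency test fails, otherwise increments
def lms_fwd : List (Int × Int) → Int → Option (Int × Int) → Int
  | [], run, _ => run
  | card :: rest, run, prev =>
    match prev with
    | none => lms_fwd rest 1 (some card)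
    | some p =>
      if !(goes_below card p) then lms_fwd rest 1 (some card)
      else lms_fwd rest (run + 1) (some card)

def longest_movable_sequence_alt (cards : List (Int × Int)) : Int :=
  lms_fwd cards 0 none

-- ===== PRECONDITION & SPEC =====
def Spec_longest_movable_sequence (cards : List (Int × Int)) (out : Int) : Prop := out = longest_movable_sequence_alt cards
instance (cards : List (Int × Int)) (out : Int) : Decidable (Spec_longest_movable_sequence cards out) := by unfold Spec_longest_movable_sequence; infer_instance

-- ===== CLAIM (what is proved, stated in full; the proofs are below) =====
def Claim_equal_longest_movable_sequence : Prop := ∀ (cards : List (Int × Int)), Dom_longest_movable_sequence cards → Spec_longest_movable_sequence cards (longest_movable_sequence cards)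

-- ===== LEMMAS AND PROOFS =====

-- trailing-run counter: leading Trues of a boolean list
def rfb : List Bool → Int
  | [] => 0
  | ok :: rest => if !ok then 0 else 1 + rfb rest

-- the list of adjacency test results, in forward order
def pairsB : List (Int × Int) → List Bool
  | [] => []
  | [_] => []
  | a :: b :: rest => goes_below b a :: pairsB (b :: rest)

-- whole-chain validity starting below p
def chain : (Int × Int) → List (Int × Int) → Bool
  | _, [] => true
  | p, c :: cs => goes_below c p && chain c cs

theorem rfb_bounds : ∀ xs : List Bool, 0 ≤ rfb xs ∧ rfb xs ≤ (xs.length : Int) := by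
  intro xs
  induction xs with
  | nil => simp [rfb]
  | cons x rest ih =>
    by_cases h : x = true
    · simp [rfb, h]; omega
    · simp [rfb, h]; omega

theorem rfb_append (xs : List Bool) (b : Bool) :
    rfb (xs ++ [b]) =
      if rfb xs = (xs.length : Int) then (xs.length : Int) + (if b then 1 else 0)
      else rfb xs := by
  induction xs with
  | nil => cases b <;> simp [rfb]
  | cons x rest ih =>
    by_cases h : x = true
    · have hb := rfb_bounds rest
      simp only [h, List.cons_append, rfb, Bool.not_true, Bool.false_eq_true, if_false, ih,
        List.length_cons]
      by_cases hc : rfb rest = (rest.length : Int)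
      · simp [hc]; split_ifs <;> omega
      · have : ¬ (1 + rfb rest = ((rest.length : Nat) + 1 : Int)) := by omega
        simp [hc, this]
    · simp [rfb, h]
      have : (0 : Int) ≠ ((rest.length : Nat) + 1 : Int) := by omega
      push_cast at this ⊢
      simp [this]

theorem pairsB_length : ∀ cards : List (Int × Int), (pairsB cards).length = cards.length - 1 := by
  intro cards
  match cards with
  | [] => rfl
  | [_] => rfl
  | a :: b :: rest => simp [pairsB, pairsB_length (b :: rest)]

theorem pairsB_getElem : ∀ (cards : List (Int × Int)) (k : Nat) (h : k + 1 < cards.length),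
    (pairsB cards)[k]'(by rw [pairsB_length]; omega)
      = goes_below (cards[k + 1]'h) (cards[k]'(by omega)) := by
  intro cards
  match cards with
  | [] => intro k h; simp at h
  | [_] => intro k h; simp at h
  | a :: b :: rest =>
    intro k h
    match k with
    | 0 => rfl
    | k + 1 =>
      have h' : k + 1 < (b :: rest).length := by
        simp only [List.length_cons] at h ⊢; omega
      simpa [pairsB] using pairsB_getElem (b :: rest) k h'

-- chain validity ↔ all adjacency results True (counted via rfb of the reverse)
theorem chain_iff_rfb : ∀ (rest : List (Int × Int)) (b : Int × Int),
    (rfb ((pairsB (b :: rest)).reverse) = ((pairsB (b :: rest)).length : Int))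
      ↔ chain b rest = true := by
  intro rest
  induction rest with
  | nil => intro b; simp [pairsB, rfb, chain]
  | cons x r ih =>
    intro b
    have hlen : ((pairsB (x :: r)).reverse).length = (pairsB (x :: r)).length := by simp
    have hb := rfb_bounds ((pairsB (x :: r)).reverse)
    rw [hlen] at hb
    simp only [pairsB, List.reverse_cons, chain]
    rw [rfb_append]
    by_cases hc : rfb ((pairsB (x :: r)).reverse) = ((pairsB (x :: r)).length : Int)
    · have hchain : chain x r = true := (ih x).mp hc
      rw [hlen, if_pos hc, hchain, Bool.and_true]
      push_cast [List.length_cons]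
      cases hg : goes_below x b <;> simp
    · have hchain : chain x r ≠ true := fun hh => hc ((ih x).mpr hh)
      simp only [hlen, hc, if_false]
      constructor
      · intro heq; exfalso; push_cast [List.length_cons] at heq; omega
      · intro hh; exfalso; simp [Bool.eq_false_iff.mpr hchain] at hh

-- A's break-loop unfolds to the initial accumulator plus the leading-True count
theorem lms_loop_eq (cards : List (Int × Int)) :
    ∀ (is_ : List Int) (acc : Int),
      lms_loop cards is_ acc = acc + rfb (is_.map
        (fun i => goes_below ((PySem.List.pyGet? cards i).getD (0, 0))
                             ((PySem.List.pyGet? cards (i - 1)).getD (0, 0)))) := by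
  intro is_
  induction is_ with
  | nil => intro acc; simp [lms_loop, rfb]
  | cons i rest ih =>
    intro acc
    simp only [lms_loop, List.map_cons, rfb]
    by_cases h : goes_below ((PySem.List.pyGet? cards i).getD (0, 0))
        ((PySem.List.pyGet? cards (i - 1)).getD (0, 0)) = true
    · simp [h, ih]; ring
    · simp [Bool.eq_false_iff.mpr h]

-- the list A's loop maps over is exactly the reversed adjacency list
theorem range_pairs_eq (cards : List (Int × Int)) (h : cards ≠ []) :
    (PySem.List.pyRange (-1) (-(cards.length : Int)) (-1)).map
      (fun i => goes_below ((PySem.List.pyGet? cards i).getD (0, 0))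
                           ((PySem.List.pyGet? cards (i - 1)).getD (0, 0)))
    = (pairsB cards).reverse := by
  have hn : 1 ≤ cards.length := List.length_pos_iff.mpr h
  rw [PySem.List.pyRange_neg_one, List.map_map]
  apply List.ext_getElem
  · simp [pairsB_length]; omega
  · intro k h1 h2
    simp only [List.length_map, List.length_range] at h1
    have hk : k < cards.length - 1 := by omega
    simp only [List.getElem_map, List.getElem_range, List.getElem_reverse,
      pairsB_length, Function.comp]
    have e1 : (-1 : Int) - (k : Int) = -(((k + 1 : Nat) : Int)) := by push_cast; ring
    have e2 : -(((k + 1 : Nat) : Int)) - 1 = -(((k + 2 : Nat) : Int)) := by push_cast; ring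
    rw [e1, e2, PySem.List.pyGet?_neg_natCast cards (k + 1) (by omega) (by omega),
      PySem.List.pyGet?_neg_natCast cards (k + 2) (by omega) (by omega)]
    rw [pairsB_getElem cards (cards.length - 1 - 1 - k) (by omega)]
    have i1 : cards.length - (k + 1) = (cards.length - 1 - 1 - k) + 1 := by omega
    have i2 : cards.length - (k + 2) = cards.length - 1 - 1 - k := by omega
    rw [i1, i2,
      List.getElem?_eq_getElem (show cards.length - 1 - 1 - k + 1 < cards.length by omega),
      List.getElem?_eq_getElem (show cards.length - 1 - 1 - k < cards.length by omega)]
    rfl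

-- A on a nonempty list = 1 + trailing valid-run length
theorem A_char (c : Int × Int) (cs : List (Int × Int)) :
    longest_movable_sequence (c :: cs) = 1 + rfb ((pairsB (c :: cs)).reverse) := by
  rw [longest_movable_sequence]
  simp only [List.isEmpty_cons, Bool.not_false, if_true]
  rw [lms_loop_eq, range_pairs_eq _ (by simp)]

-- B's fold with a live previous card: completes the chain or restarts from scratch
theorem fwd_char : ∀ (cs : List (Int × Int)) (p : Int × Int) (run : Int),
    lms_fwd cs run (some p) =
      if chain p cs then run + (cs.length : Int) else lms_fwd cs 0 none := by
  intro cs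
  induction cs with
  | nil => intro p run; simp [lms_fwd, chain]
  | cons c cs' ih =>
    intro p run
    by_cases hg : goes_below c p = true
    · simp only [lms_fwd, hg, Bool.not_true, Bool.false_eq_true, if_false, chain, Bool.and_eq_true]
      by_cases hc : chain c cs' = true
      · simp [hc, ih]; ring
      · simp [hc, ih]
    · simp only [lms_fwd, Bool.eq_false_iff.mp (Bool.not_eq_true _ ▸ hg), chain]
      simp [ih]

theorem alt_char (c : Int × Int) (cs : List (Int × Int)) :
    longest_movable_sequence_alt (c :: cs) =
      if chain c cs then 1 + (cs.length : Int) else longest_movable_sequence_alt cs := by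
  show lms_fwd (c :: cs) 0 none = _
  simp only [lms_fwd]
  rw [fwd_char]
  rfl

theorem main_eq : ∀ cards : List (Int × Int),
    longest_movable_sequence cards = longest_movable_sequence_alt cards := by
  intro cards
  induction cards with
  | nil => rfl
  | cons c cs ih =>
    rw [A_char, alt_char]
    match cs with
    | [] => simp [pairsB, rfb, chain]
    | b :: rest =>
      have hA' : longest_movable_sequence (b :: rest) = 1 + rfb ((pairsB (b :: rest)).reverse) :=
        A_char b rest
      rw [hA'] at ih
      simp only [pairsB, List.reverse_cons, chain]
      rw [rfb_append]
      have hlen : ((pairsB (b :: rest)).reverse).length = (pairsB (b :: rest)).length := by simp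
      rw [hlen]
      have hplen : (pairsB (b :: rest)).length = rest.length := by
        simp [pairsB_length]
      by_cases hc : chain b rest = true
      · have hr : rfb ((pairsB (b :: rest)).reverse) = ((pairsB (b :: rest)).length : Int) :=
          (chain_iff_rfb rest b).mpr hc
        by_cases hg : goes_below b c = true
        · simp [hr, hg, hc, hplen]
        · have : longest_movable_sequence_alt (b :: rest) = 1 + (rest.length : Int) := by
            rw [alt_char]; simp [hc]
          simp [hr, hg, hc, hplen, ← ih]
      · have hr : rfb ((pairsB (b :: rest)).reverse) ≠ ((pairsB (b :: rest)).length : Int) :=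
          fun hh => hc ((chain_iff_rfb rest b).mp hh)
        simp [hr, hc, ih]

-- ===== VERDICT (by name: the statement is the Claim_ definition above) =====
theorem longest_movable_sequence_spec : Claim_equal_longest_movable_sequence := by
  intro cards _
  unfold Spec_longest_movable_sequence
  exact main_eq cards
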